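-- pv_equiv track=rewrite | github.com/ericaddison/AdventOfCode2018 | src/2/inventory_management.py | checksum
-- ===== SOURCE A (Python) =====
-- def char_counts(in_string):
--   char_count = {}
--   for char in in_string:
--     current_count = char_count.get(char, 0)
--     char_count[char] = current_count + 1
--   return char_count
--
-- def checksum(ids):
--   two_char_id_count = 0
--   three_char_id_count = 0
--
--   for id in ids:
--     char_count = char_counts(id)
--     if 2 in char_count.values():
--       two_char_id_count = two_char_id_count + 1
--     if 3 in char_count.values():
--       three_char_id_count = three_char_id_count + 1
--
--   return two_char_id_count * three_char_id_count
-- ===== SOURCE B (Python) =====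
-- def run_lengths(chars):
--     lens = []
--     while chars:
--         c = chars[0]
--         k = 1
--         while k < len(chars) and chars[k] == c:
--             k += 1
--         lens.append(k)
--         chars = chars[k:]
--     return lens
--
-- def checksum(ids):
--     twos = 0
--     threes = 0
--     for s in ids:
--         lens = run_lengths(sorted(s))
--         if 2 in lens:
--             twos += 1
--         if 3 in lens:
--             threes += 1
--     return twos * threes
-- ===== Notes on version B (the rewrite author's own statement) =====
-- stated objective: alternative
-- what changed: Per-ID hash frequency dict replaced by sorting each ID's characters and scanning the run lengths of equal-character runs; 2/3 detection becomes membership in the run-length list.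
import Mathlib
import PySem

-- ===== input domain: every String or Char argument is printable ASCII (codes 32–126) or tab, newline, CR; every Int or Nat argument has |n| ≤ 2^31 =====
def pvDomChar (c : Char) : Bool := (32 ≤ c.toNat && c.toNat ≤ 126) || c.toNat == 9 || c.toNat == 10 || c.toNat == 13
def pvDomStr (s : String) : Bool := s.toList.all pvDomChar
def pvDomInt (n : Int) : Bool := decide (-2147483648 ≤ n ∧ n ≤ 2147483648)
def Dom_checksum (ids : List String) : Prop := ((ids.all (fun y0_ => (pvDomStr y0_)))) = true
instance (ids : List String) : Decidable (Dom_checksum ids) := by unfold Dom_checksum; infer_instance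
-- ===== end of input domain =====

-- B replaces A's per-ID hash frequency dict by sorting each ID and scanning its equal-character run lengths (objective: alternative algorithm, similar cost).

-- ===== PORT A =====
-- char_counts: dict built by get-then-insert over the string's characters
def charCounts (s : String) : PySem.Dict Char Int :=
  s.toList.foldl (fun d c => d.insert c (d.getD c 0 + 1)) PySem.Dict.empty

def checksum (ids : List String) : Int :=
  let p := ids.foldl (fun (acc : Int × Int) id =>
    let cc := charCounts id
    let two := if (2 : Int) ∈ cc.values then acc.1 + 1 else acc.1
    let three := if (3 : Int) ∈ cc.values then acc.2 + 1 else acc.2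
    (two, three)) (0, 0)
  p.1 * p.2

-- ===== PORT B =====
-- run_lengths: peel off the leading run (k = 1 + length of the matching prefix), continue on the rest
def runLengths : List Char → List Nat
  | [] => []
  | c :: rest =>
    (1 + (rest.takeWhile (fun x => x == c)).length) :: runLengths (rest.dropWhile (fun x => x == c))
termination_by l => l.length
decreasing_by
  simp only [List.length_cons]
  exact Nat.lt_succ_of_le (List.Sublist.length_le (List.dropWhile_sublist _))

def checksum_alt (ids : List String) : Int :=
  let p := ids.foldl (fun (acc : Int × Int) s =>
    let lens := runLengths (PySem.List.sorted s.toList (fun c => c) false)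
    let twos := if 2 ∈ lens then acc.1 + 1 else acc.1
    let threes := if 3 ∈ lens then acc.2 + 1 else acc.2
    (twos, threes)) (0, 0)
  p.1 * p.2

-- ===== PRECONDITION & SPEC =====
def Spec_checksum (ids : List String) (out : Int) : Prop := out = checksum_alt ids
instance (ids : List String) (out : Int) : Decidable (Spec_checksum ids out) := by unfold Spec_checksum; infer_instance

-- ===== CLAIM (what is proved, stated in full; the proofs are below) =====
def Claim_equal_checksum : Prop := ∀ (ids : List String), Dom_checksum ids → Spec_checksum ids (checksum ids)

-- ===== LEMMAS AND PROOFS =====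

-- On a ≤-sorted list, the run lengths are exactly the multiplicities of its members.
theorem mem_runLengths (l : List Char) (hs : l.Pairwise (· ≤ ·)) (n : Nat) :
    n ∈ runLengths l ↔ ∃ c, c ∈ l ∧ l.count c = n := by
  induction l using runLengths.induct with
  | case1 => simp [runLengths]
  | case2 c rest ih =>
    rcases List.pairwise_cons.mp hs with ⟨hle, hrest⟩
    have hd : (rest.dropWhile (fun x => x == c)).Pairwise (· ≤ ·) :=
      List.Pairwise.sublist (List.dropWhile_sublist _) hrest
    have ihd := ih hd
    have hsplit : rest.takeWhile (fun x => x == c) ++ rest.dropWhile (fun x => x == c) = rest :=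
      List.takeWhile_append_dropWhile
    have htake : ∀ x ∈ rest.takeWhile (fun x => x == c), x = c := by
      intro x hx
      have hpx := @List.mem_takeWhile_imp _ (fun x => x == c) rest x hx
      exact eq_of_beq hpx
    have hcnot : c ∉ rest.dropWhile (fun x => x == c) := by
      intro hc
      have hne : rest.dropWhile (fun x => x == c) ≠ [] := List.ne_nil_of_mem hc
      have he := List.head_dropWhile_not (fun x => x == c) hne
      have hec : (rest.dropWhile (fun x => x == c)).head hne ≠ c := by simpa using he
      have hemem : (rest.dropWhile (fun x => x == c)).head hne ∈ rest :=
        List.Sublist.mem (List.head_mem hne) (List.dropWhile_sublist _)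
      have hce : c < (rest.dropWhile (fun x => x == c)).head hne :=
        lt_of_le_of_ne (hle _ hemem) (Ne.symm hec)
      obtain ⟨t, ht⟩ : ∃ t, rest.dropWhile (fun x => x == c)
          = (rest.dropWhile (fun x => x == c)).head hne :: t :=
        ⟨(rest.dropWhile (fun x => x == c)).tail, (List.cons_head_tail hne).symm⟩
      rw [ht] at hc hd
      rcases List.mem_cons.mp hc with h | h
      · exact hec h.symm
      · have : (rest.dropWhile (fun x => x == c)).head hne ≤ c :=
          (List.pairwise_cons.mp hd).1 c h
        exact absurd (lt_of_lt_of_le hce this) (lt_irrefl c)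
    have hcount_take : (rest.takeWhile (fun x => x == c)).count c
        = (rest.takeWhile (fun x => x == c)).length := by
      apply List.count_eq_length.mpr
      intro x hx; exact (htake x hx).symm
    have h1 : rest.count c = (rest.takeWhile (fun x => x == c)).length := by
      conv_lhs => rw [← hsplit]
      rw [List.count_append, hcount_take, List.count_eq_zero.mpr hcnot]
      omega
    have hcount_c : (c :: rest).count c = 1 + (rest.takeWhile (fun x => x == c)).length := by
      simp [h1, Nat.add_comm]
    have hcount_x : ∀ x, x ≠ c →
        (c :: rest).count x = (rest.dropWhile (fun x => x == c)).count x := by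
      intro x hx
      have h2 : rest.count x = (rest.dropWhile (fun x => x == c)).count x := by
        conv_lhs => rw [← hsplit]
        rw [List.count_append, List.count_eq_zero.mpr (fun hm => hx (htake x hm))]
        omega
      simp [h2, Ne.symm hx]
    rw [runLengths]
    constructor
    · intro h
      rcases List.mem_cons.mp h with h | h
      · exact ⟨c, List.mem_cons_self, by rw [hcount_c]; exact h.symm⟩
      · rcases ihd.mp h with ⟨x, hxm, hxc⟩
        have hxne : x ≠ c := fun hh => hcnot (hh ▸ hxm)
        exact ⟨x, List.mem_cons_of_mem _ (List.Sublist.mem hxm (List.dropWhile_sublist _)),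
          by rw [hcount_x x hxne]; exact hxc⟩
    · rintro ⟨x, hxm, hxc⟩
      by_cases hx : x = c
      · subst hx
        exact List.mem_cons.mpr (Or.inl (by rw [← hxc, hcount_c]))
      · apply List.mem_cons_of_mem
        apply ihd.mpr
        refine ⟨x, ?_, by rw [← hcount_x x hx]; exact hxc⟩
        rcases List.mem_cons.mp hxm with h | h
        · exact absurd h hx
        · rw [← hsplit] at h
          rcases List.mem_append.mp h with h | h
          · exact absurd (htake x h) hx
          · exact h

-- A's membership test "n in char_counts(s).values()" in terms of counts
theorem mem_values_charCounts (s : String) (n : Int) :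
    n ∈ (charCounts s).values ↔ ∃ c, c ∈ s.toList ∧ (s.toList.count c : Int) = n := by
  have hc : charCounts s = PySem.Dict.counter s.toList :=
    PySem.Dict.foldl_insert_getD_add_one_eq_counter s.toList
  rw [hc]
  have hitems := PySem.Dict.items_counter (xs := s.toList)
  have hv : (PySem.Dict.counter s.toList).values
      = (PySem.Set.ofList s.toList).map (fun k => (s.toList.count k : Int)) := by
    simp only [PySem.Dict.values, hitems, List.map_map]
    rfl
  rw [hv]
  simp only [List.mem_map]
  constructor
  · rintro ⟨c, hm, h⟩
    exact ⟨c, (PySem.Set.mem_ofList _ _).mp hm, h⟩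
  · rintro ⟨c, hm, h⟩
    exact ⟨c, (PySem.Set.mem_ofList _ _).mpr hm, h⟩

-- B's membership test in terms of counts
theorem mem_runLengths_sorted (s : String) (n : Nat) :
    n ∈ runLengths (PySem.List.sorted s.toList (fun c => c) false)
      ↔ ∃ c, c ∈ s.toList ∧ s.toList.count c = n := by
  have hp : (PySem.List.sorted s.toList (fun c => c) false).Pairwise (· ≤ ·) := by
    simpa using PySem.List.sorted_pairwise s.toList (fun c => c)
  have hperm : (PySem.List.sorted s.toList (fun c => c) false).Perm s.toList :=
    PySem.List.sorted_perm s.toList (fun c => c) false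
  rw [mem_runLengths _ hp]
  constructor
  · rintro ⟨c, hm, hc⟩
    exact ⟨c, hperm.mem_iff.mp hm, by rw [← hperm.count_eq]; exact hc⟩
  · rintro ⟨c, hm, hc⟩
    exact ⟨c, hperm.mem_iff.mpr hm, by rw [hperm.count_eq]; exact hc⟩

theorem cond_eq (s : String) (n : Nat) :
    ((n : Int) ∈ (charCounts s).values)
      ↔ n ∈ runLengths (PySem.List.sorted s.toList (fun c => c) false) := by
  rw [mem_values_charCounts, mem_runLengths_sorted]
  constructor
  · rintro ⟨c, hm, h⟩; exact ⟨c, hm, by exact_mod_cast h⟩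
  · rintro ⟨c, hm, h⟩; exact ⟨c, hm, by exact_mod_cast h⟩

theorem cond_eq2 (s : String) :
    ((2 : Int) ∈ (charCounts s).values)
      ↔ 2 ∈ runLengths (PySem.List.sorted s.toList (fun c => c) false) := by
  simpa using cond_eq s 2

theorem cond_eq3 (s : String) :
    ((3 : Int) ∈ (charCounts s).values)
      ↔ 3 ∈ runLengths (PySem.List.sorted s.toList (fun c => c) false) := by
  simpa using cond_eq s 3

theorem fold_eq (ids : List String) (acc : Int × Int) :
    ids.foldl (fun (acc : Int × Int) id =>
      let cc := charCounts id
      let two := if (2 : Int) ∈ cc.values then acc.1 + 1 else acc.1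
      let three := if (3 : Int) ∈ cc.values then acc.2 + 1 else acc.2
      (two, three)) acc
    = ids.foldl (fun (acc : Int × Int) s =>
      let lens := runLengths (PySem.List.sorted s.toList (fun c => c) false)
      let twos := if 2 ∈ lens then acc.1 + 1 else acc.1
      let threes := if 3 ∈ lens then acc.2 + 1 else acc.2
      (twos, threes)) acc := by
  induction ids generalizing acc with
  | nil => rfl
  | cons s t ih =>
    simp only [List.foldl_cons, cond_eq2 s, cond_eq3 s]
    exact ih _

-- ===== VERDICT (by name: the statement is the Claim_ definition above) =====
theorem checksum_spec : Claim_equal_checksum := by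
  intro ids _
  exact congrArg (fun p : Int × Int => p.1 * p.2) (fold_eq ids (0, 0))
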